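-- pv_equiv track=rewrite | github.com/t-way666/New_Tg_bot_mlbb | config/constants.py | get_rank_and_level
-- ===== SOURCE A (Python) =====
-- RANKS = [
--     "Воин",
--     "Элита",
--     "Мастер",
--     "Грандмастер",
--     "Эпик",
--     "Легенда",
--     "Мифический"
-- ]
--
-- RANK_DETAILS = {
--     "Воин": {
--         "min_level": 3,  # Начинаем с уровня 3
--         "max_level": 1,  # Заканчиваем уровнем 1
--         "stars_per_level": 3,  # 3 звезды на уровень
--         "total_stars": 9  # Всего в ранге
--     },
--     "Элита": {
--         "min_level": 3,
--         "max_level": 1,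
--         "stars_per_level": 4,
--         "total_stars": 12
--     },
--     "Мастер": {
--         "min_level": 4,
--         "max_level": 1,
--         "stars_per_level": 4,
--         "total_stars": 16
--     },
--     "Грандмастер": {
--         "min_level": 5,
--         "max_level": 1,
--         "stars_per_level": 5,
--         "total_stars": 25
--     },
--     "Эпик": {
--         "min_level": 5,
--         "max_level": 1,
--         "stars_per_level": 5,
--         "total_stars": 25
--     },
--     "Легенда": {
--         "min_level": 5,
--         "max_level": 1,
--         "stars_per_level": 5,
--         "total_stars": 25
--     },
--     "Мифический": {
--         "min_level": 1,
--         "max_level": 1,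
--         "stars_per_level": 0,
--         "total_stars": 0
--     }
-- }
--
-- MYTHIC_GRADES = {
--     "": (0, 24),        # Просто Мифический
--     "Честь": (25, 49),  # Мифическая Честь
--     "Слава": (50, 99),  # Мифическая Слава
--     "Бессмертный": (100, float('inf'))  # Мифический Бессмертный
-- }
--
-- def get_rank_and_level(total_stars):
--     """
--     Определяет ранг и уровень по общему количеству звезд
--     """
--     if total_stars >= 112:  # Мифический ранг
--         mythic_stars = total_stars - 112
--         for grade, (min_stars, max_stars) in MYTHIC_GRADES.items():
--             if min_stars <= mythic_stars <= max_stars: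
--                 if grade:  # Если есть градация (Честь/Слава/Бессмертный)
--                     return f"Мифический {grade}", mythic_stars
--                 return "Мифический", mythic_stars
--         return "Мифический Бессмертный", mythic_stars
--
--     stars_left = total_stars
--     for rank in RANKS:
--         if rank == "Мифический":
--             break
--
--         details = RANK_DETAILS[rank]
--         if stars_left < details["total_stars"]:
--             # Определяем уровень в текущем ранге
--             current_stars = 0
--             for level in range(details["min_level"], details["max_level"] - 1, -1):
--                 stars_for_level = details["stars_per_level"]
--                 if stars_left < stars_for_level:
--                     return rank, level
--                 stars_left -= stars_for_level
--         stars_left -= details["total_stars"]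
--
--     return "Воин", 3  # Начальный ранг
-- ===== SOURCE B (Python) =====
-- RANKS = [
--     "Воин",
--     "Элита",
--     "Мастер",
--     "Грандмастер",
--     "Эпик",
--     "Легенда",
--     "Мифический"
-- ]
--
-- RANK_DETAILS = {
--     "Воин": {"min_level": 3, "max_level": 1, "stars_per_level": 3, "total_stars": 9},
--     "Элита": {"min_level": 3, "max_level": 1, "stars_per_level": 4, "total_stars": 12},
--     "Мастер": {"min_level": 4, "max_level": 1, "stars_per_level": 4, "total_stars": 16},
--     "Грандмастер": {"min_level": 5, "max_level": 1, "stars_per_level": 5, "total_stars": 25},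
--     "Эпик": {"min_level": 5, "max_level": 1, "stars_per_level": 5, "total_stars": 25},
--     "Легенда": {"min_level": 5, "max_level": 1, "stars_per_level": 5, "total_stars": 25},
--     "Мифический": {"min_level": 1, "max_level": 1, "stars_per_level": 0, "total_stars": 0}
-- }
--
-- # Flat ladder: one (rank, level, cost) step per level, highest level first within a rank.
-- STEPS = [
--     (rank, level, RANK_DETAILS[rank]["stars_per_level"])
--     for rank in RANKS[:-1]
--     for level in range(RANK_DETAILS[rank]["min_level"], RANK_DETAILS[rank]["max_level"] - 1, -1)
-- ]
--
-- def get_rank_and_level(total_stars):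
--     """
--     Определяет ранг и уровень по общему количеству звезд
--     """
--     if total_stars >= 112:  # Мифический ранг
--         mythic_stars = total_stars - 112
--         if mythic_stars >= 100:
--             return "Мифический Бессмертный", mythic_stars
--         if mythic_stars >= 50:
--             return "Мифический Слава", mythic_stars
--         if mythic_stars >= 25:
--             return "Мифический Честь", mythic_stars
--         return "Мифический", mythic_stars
--
--     stars_left = total_stars
--     for rank, level, cost in STEPS:
--         if stars_left < cost:
--             return rank, level
--         stars_left -= cost
--     return "Воин", 3  # Начальный ранг
-- ===== Notes on version B (the rewrite author's own statement) =====
-- stated objective: simpler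
-- what changed: The nested rank/level loops with per-rank total-stars bookkeeping are replaced by one precomputed flat (rank, level, cost) ladder scanned in a single pass, and the mythic dict loop by a plain if-chain.
import Mathlib
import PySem

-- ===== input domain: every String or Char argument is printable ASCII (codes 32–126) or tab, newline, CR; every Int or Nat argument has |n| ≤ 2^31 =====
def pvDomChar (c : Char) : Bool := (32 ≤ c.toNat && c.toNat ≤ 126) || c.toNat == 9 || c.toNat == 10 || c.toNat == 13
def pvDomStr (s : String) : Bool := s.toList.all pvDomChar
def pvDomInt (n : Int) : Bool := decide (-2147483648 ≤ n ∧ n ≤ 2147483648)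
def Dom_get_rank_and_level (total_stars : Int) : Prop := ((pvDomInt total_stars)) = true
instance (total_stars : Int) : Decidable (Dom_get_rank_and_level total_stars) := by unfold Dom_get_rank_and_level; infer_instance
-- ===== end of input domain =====

-- B replaces A's nested rank/level loops by a single pass over one precomputed flat
-- (rank, level, cost) ladder, and the mythic dict loop by an if-chain (objective: simpler).

-- ===== PORT A =====
def pvRanks : List String :=
  ["Воин", "Элита", "Мастер", "Грандмастер", "Эпик", "Легенда", "Мифический"]

-- details as (min_level, max_level, stars_per_level, total_stars)
def pvRankDetails : PySem.Dict String (Int × Int × Int × Int) :=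
  PySem.Dict.ofList [("Воин", (3, 1, 3, 9)), ("Элита", (3, 1, 4, 12)), ("Мастер", (4, 1, 4, 16)),
   ("Грандмастер", (5, 1, 5, 25)), ("Эпик", (5, 1, 5, 25)), ("Легенда", (5, 1, 5, 25)),
   ("Мифический", (1, 1, 0, 0))]

-- Python's float('inf') upper bound is represented as `none` (comparison against it is always true)
def pvMythicGrades : List (String × (Int × Option Int)) :=
  [("", (0, some 24)), ("Честь", (25, some 49)), ("Слава", (50, some 99)),
   ("Бессмертный", (100, none))]

-- A's loop over MYTHIC_GRADES.items(); falling off the list is the unreachable fallback return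
def pvMythicLoop (mythic_stars : Int) : List (String × (Int × Option Int)) → String × Int
  | [] => ("Мифический Бессмертный", mythic_stars)
  | (grade, (min_stars, max_stars)) :: rest =>
      if min_stars ≤ mythic_stars && (match max_stars with | some h => decide (mythic_stars ≤ h) | none => true) then
        if grade ≠ "" then ("Мифический " ++ grade, mythic_stars)
        else ("Мифический", mythic_stars)
      else pvMythicLoop mythic_stars rest

-- A's inner `for level in range(min_level, max_level - 1, -1)` loop:
-- returns (some result) on early return, else the updated stars_left
def pvInnerLoop (rank : String) (per : Int) : List Int → Int → Option (String × Int) × Int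
  | [], s => (none, s)
  | level :: rest, s =>
      if s < per then (some (rank, level), s) else pvInnerLoop rank per rest (s - per)

-- A's outer `for rank in RANKS` loop (break on "Мифический" falls to the final return)
def pvOuterLoop : List String → Int → String × Int
  | [], _ => ("Воин", 3)
  | rank :: rest, stars_left =>
      if rank = "Мифический" then ("Воин", 3)
      else
        -- RANK_DETAILS[rank]: key always present; default only makes the lookup total
        let d := PySem.Dict.getD pvRankDetails rank (0, 0, 0, 0)
        let r :=
          if stars_left < d.2.2.2 then
            pvInnerLoop rank d.2.2.1 (PySem.List.pyRange d.1 (d.2.1 - 1) (-1)) stars_left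
          else (none, stars_left)
        match r with
        | (some res, _) => res
        | (none, s') => pvOuterLoop rest (s' - d.2.2.2)

def get_rank_and_level (total_stars : Int) : String × Int :=
  if total_stars ≥ 112 then pvMythicLoop (total_stars - 112) pvMythicGrades
  else pvOuterLoop pvRanks total_stars

-- ===== PORT B =====
-- STEPS: flat ladder, one (rank, level, cost) per level, built from the same constants
def pvSteps : List (String × Int × Int) :=
  (PySem.List.slice pvRanks none (some (-1))).flatMap (fun rank =>
    let d := PySem.Dict.getD pvRankDetails rank (0, 0, 0, 0)
    (PySem.List.pyRange d.1 (d.2.1 - 1) (-1)).map (fun level => (rank, level, d.2.2.1)))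

def pvStepLoop : List (String × Int × Int) → Int → String × Int
  | [], _ => ("Воин", 3)
  | (rank, level, cost) :: rest, stars_left =>
      if stars_left < cost then (rank, level) else pvStepLoop rest (stars_left - cost)

def get_rank_and_level_alt (total_stars : Int) : String × Int :=
  if total_stars ≥ 112 then
    let mythic_stars := total_stars - 112
    if mythic_stars ≥ 100 then ("Мифический Бессмертный", mythic_stars)
    else if mythic_stars ≥ 50 then ("Мифический Слава", mythic_stars)
    else if mythic_stars ≥ 25 then ("Мифический Честь", mythic_stars)
    else ("Мифический", mythic_stars)
  else pvStepLoop pvSteps total_stars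

-- ===== PRECONDITION & SPEC =====
def Spec_get_rank_and_level (total_stars : Int) (out : String × Int) : Prop := out = get_rank_and_level_alt total_stars
instance (total_stars : Int) (out : String × Int) : Decidable (Spec_get_rank_and_level total_stars out) := by unfold Spec_get_rank_and_level; infer_instance

-- ===== CLAIM (what is proved, stated in full; the proofs are below) =====
def Claim_equal_get_rank_and_level : Prop := ∀ (total_stars : Int), Dom_get_rank_and_level total_stars → Spec_get_rank_and_level total_stars (get_rank_and_level total_stars)

-- ===== LEMMAS AND PROOFS =====

-- mythic branch: both sides agree for every total_stars ≥ 112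
theorem pv_mythic_eq (t : Int) (h : 112 ≤ t) :
    pvMythicLoop (t - 112) pvMythicGrades =
      (if t - 112 ≥ 100 then ("Мифический Бессмертный", t - 112)
       else if t - 112 ≥ 50 then ("Мифический Слава", t - 112)
       else if t - 112 ≥ 25 then ("Мифический Честь", t - 112)
       else ("Мифический", t - 112)) := by
  simp only [pvMythicGrades, pvMythicLoop, Bool.and_eq_true, decide_eq_true_eq]
  split_ifs <;> simp_all <;> omega

-- negative stars: both fall out at the very first step
theorem pv_details_voin : PySem.Dict.getD pvRankDetails "Воин" (0, 0, 0, 0) = (3, 1, 3, 9) := by decide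

theorem pv_range_voin : PySem.List.pyRange 3 0 (-1) = [3, 2, 1] := by decide

theorem pv_steps_eval : pvSteps =
    [("Воин", 3, 3), ("Воин", 2, 3), ("Воин", 1, 3),
     ("Элита", 3, 4), ("Элита", 2, 4), ("Элита", 1, 4),
     ("Мастер", 4, 4), ("Мастер", 3, 4), ("Мастер", 2, 4), ("Мастер", 1, 4),
     ("Грандмастер", 5, 5), ("Грандмастер", 4, 5), ("Грандмастер", 3, 5), ("Грандмастер", 2, 5), ("Грандмастер", 1, 5),
     ("Эпик", 5, 5), ("Эпик", 4, 5), ("Эпик", 3, 5), ("Эпик", 2, 5), ("Эпик", 1, 5),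
     ("Легенда", 5, 5), ("Легенда", 4, 5), ("Легенда", 3, 5), ("Легенда", 2, 5), ("Легенда", 1, 5)] := by decide

theorem pv_neg_eq (t : Int) (h : t < 3) : pvOuterLoop pvRanks t = pvStepLoop pvSteps t := by
  have h9 : t < 9 := by omega
  simp [pvRanks, pvOuterLoop, pvInnerLoop, pv_details_voin, pv_range_voin,
    pv_steps_eval, pvStepLoop, h, h9]

-- 0 ≤ stars < 112: finite check
set_option maxRecDepth 40000 in
theorem pv_mid_eq : ∀ n : Fin 112, pvOuterLoop pvRanks (n : Int) = pvStepLoop pvSteps (n : Int) := by decide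

-- ===== VERDICT (by name: the statement is the Claim_ definition above) =====
theorem get_rank_and_level_spec : Claim_equal_get_rank_and_level := by
  intro t _
  unfold Spec_get_rank_and_level get_rank_and_level get_rank_and_level_alt
  by_cases h : t ≥ 112
  · simp only [h, if_pos]
    exact pv_mythic_eq t h
  · simp only [h, if_false]
    by_cases hn : t < 3
    · exact pv_neg_eq t hn
    · have h0 : 0 ≤ t := by omega
      have hlt : t < 112 := by omega
      have : t = ((t.toNat : Nat) : Int) := by omega
      rw [this]
      have hb : t.toNat < 112 := by omega
      exact pv_mid_eq ⟨t.toNat, hb⟩
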